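-- pv_equiv track=rewrite | github.com/rrenode/NodeDB | src/nodedb/utils.py | generate_name_alias
-- ===== SOURCE A (Python) =====
-- def generate_name_alias(name: str, min_length:int = 3, max_length: int = 3, forced_length: int = 0) -> str:
--     """
--     Generates a short alias from a given name by using the initials and truncating it to the desired length.
--
--     Args:
--         name (str): The original name (e.g., "todo_app").
--         min_length (int): The minimum length of the alias (default is 3 characters).
--         max_length (int): The maximum length of the alias (default is 3 characters).
--         forced_length (int): Unused.
--
--     Returns:
--         str: The generated alias.
--     """
--     name = name.lower()
--     if '_' in name:
--         words = name.split('_')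
--     elif ' ' in name:
--         words = name.split(' ')
--     else:
--         words = [name]  # fallback if no separators
--
--     alias = ''.join([word[0] for word in words if word])
--
--     # If alias is too short, continue adding more letters from words
--     if len(alias) < min_length:
--         for word in words:
--             i = 1  # start after first letter
--             while len(alias) < min_length and i < len(word):
--                 alias += word[i]
--                 i += 1
--
--     return alias[:max_length]  # cut off at max_length
-- ===== SOURCE B (Python) =====
-- def generate_name_alias(name: str, min_length: int = 3, max_length: int = 3, forced_length: int = 0) -> str:
--     name = name.lower()
--     sep = '_' if '_' in name else (' ' if ' ' in name else None)
--     words = name.split(sep) if sep else [name]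
--     initials = ''.join(w[:1] for w in words)
--     rest = ''.join(w[1:] for w in words)
--     pad = min_length - len(initials)
--     alias = initials + rest[:pad] if pad > 0 else initials
--     return alias[:max_length]
-- ===== Notes on version B (the rewrite author's own statement) =====
-- stated objective: simpler
-- what changed: Replaces A's stateful nested for/while padding loop (char-by-char alias += word[i]) with a direct computation: join the per-word remainders once and append a single clamped slice rest[:min_length-len(initials)]
import Mathlib
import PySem

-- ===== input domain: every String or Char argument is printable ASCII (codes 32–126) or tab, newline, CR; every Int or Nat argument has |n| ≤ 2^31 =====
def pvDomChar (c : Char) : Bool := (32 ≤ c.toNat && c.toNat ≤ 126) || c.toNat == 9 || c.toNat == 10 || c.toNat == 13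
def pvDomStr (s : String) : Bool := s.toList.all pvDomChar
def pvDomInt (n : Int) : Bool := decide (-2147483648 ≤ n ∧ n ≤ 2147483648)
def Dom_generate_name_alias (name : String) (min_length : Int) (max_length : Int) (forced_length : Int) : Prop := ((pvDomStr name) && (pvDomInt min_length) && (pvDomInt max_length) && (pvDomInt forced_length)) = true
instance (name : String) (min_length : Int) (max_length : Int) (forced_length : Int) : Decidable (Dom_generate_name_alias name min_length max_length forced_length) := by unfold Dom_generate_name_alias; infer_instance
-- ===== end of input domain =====

-- B replaces A's nested pad-while-loop by "initials + rest[:pad]" computed from two precomputed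
-- streams (initials and the remainder stream), a decomposition without the stateful inner loop.


-- ===== PORT A =====
-- name.lower(); split on '_' if present, else on ' ', else [name]
def pvWordsA (name : String) : List (List Char) :=
  let n := PySem.Chars.lower name.toList
  if PySem.Chars.isIn ['_'] n then PySem.Chars.splitOn n ['_']
  else if PySem.Chars.isIn [' '] n then PySem.Chars.splitOn n [' ']
  else [n]

def generate_name_alias (name : String) (min_length : Int) (max_length : Int) (forced_length : Int) : String :=
  let words := pvWordsA name
  -- ''.join([word[0] for word in words if word])
  let alias0 := words.flatMap (fun w => match w with | [] => [] | c :: _ => [c])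
  -- padding loop: for word in words: i = 1; while len(alias) < min_length and i < len(word): alias += word[i]; i += 1
  let alias1 :=
    if (alias0.length : Int) < min_length then
      words.foldl (fun a w =>
        (w.drop 1).foldl (fun a c => if (a.length : Int) < min_length then a ++ [c] else a) a) alias0
    else alias0
  String.ofList (PySem.List.slice alias1 none (some max_length))   -- alias[:max_length]

-- ===== PORT B =====
def generate_name_alias_alt (name : String) (min_length : Int) (max_length : Int) (forced_length : Int) : String :=
  let n := PySem.Chars.lower name.toList
  -- sep = '_' if '_' in name else (' ' if ' ' in name else None)
  let sep : Option Char :=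
    if PySem.Chars.isIn ['_'] n then some '_'
    else if PySem.Chars.isIn [' '] n then some ' ' else none
  let words : List (List Char) :=
    match sep with
    | some c => PySem.Chars.splitOn n [c]
    | none => [n]
  let initials := words.flatMap (List.take 1)          -- ''.join(w[:1] for w in words)
  let rest := words.flatMap (List.drop 1)              -- ''.join(w[1:] for w in words)
  let pad := min_length - (initials.length : Int)
  let al := if 0 < pad then initials ++ PySem.List.slice rest none (some pad) else initials
  String.ofList (PySem.List.slice al none (some max_length))

-- ===== PRECONDITION & SPEC =====
def Spec_generate_name_alias (name : String) (min_length : Int) (max_length : Int) (forced_length : Int) (out : String) : Prop := out = generate_name_alias_alt name min_length max_length forced_length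
instance (name : String) (min_length : Int) (max_length : Int) (forced_length : Int) (out : String) : Decidable (Spec_generate_name_alias name min_length max_length forced_length out) := by unfold Spec_generate_name_alias; infer_instance

-- ===== CLAIM (what is proved, stated in full; the proofs are below) =====
def Claim_equal_generate_name_alias : Prop := ∀ (name : String) (min_length : Int) (max_length : Int) (forced_length : Int), Dom_generate_name_alias name min_length max_length forced_length → Spec_generate_name_alias name min_length max_length forced_length (generate_name_alias name min_length max_length forced_length)

-- ===== LEMMAS AND PROOFS =====

-- A's inner while loop over one word's tail: conditional append up to length m
theorem pv_char_fold (m : Int) (cs acc : List Char) :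
    cs.foldl (fun a c => if (a.length : Int) < m then a ++ [c] else a) acc
      = acc ++ cs.take (m - acc.length).toNat := by
  induction cs generalizing acc with
  | nil => simp
  | cons c cs ih =>
    by_cases h : (acc.length : Int) < m
    · simp only [List.foldl_cons, if_pos h, ih]
      have h1 : (m - acc.length).toNat = (m - (acc ++ [c]).length).toNat + 1 := by
        simp; omega
      rw [h1]
      simp [List.take_succ_cons]
    · have h0 : (m - acc.length).toNat = 0 := by omega
      simp only [List.foldl_cons, if_neg h, ih, h0, List.take_zero, List.append_nil]

-- A's outer for loop equals "take from the concatenated remainder stream"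
theorem pv_word_fold (m : Int) (ws : List (List Char)) (acc : List Char) :
    ws.foldl (fun a w =>
        (w.drop 1).foldl (fun a c => if (a.length : Int) < m then a ++ [c] else a) a) acc
      = acc ++ (ws.flatMap (List.drop 1)).take (m - acc.length).toNat := by
  induction ws generalizing acc with
  | nil => simp
  | cons w ws ih =>
    have hk : (m - ((acc ++ (w.drop 1).take (m - (acc.length : Int)).toNat).length : Int)).toNat
        = (m - (acc.length : Int)).toNat - (w.drop 1).length := by
      simp [List.length_take]; omega
    rw [List.foldl_cons, pv_char_fold, ih, hk, List.flatMap_cons, List.take_append,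
      List.append_assoc]

-- initials: A's guarded comprehension equals B's w[:1] stream
theorem pv_initials_eq (ws : List (List Char)) :
    ws.flatMap (fun w => match w with | [] => ([] : List Char) | c :: _ => [c])
      = ws.flatMap (List.take 1) := by
  induction ws with
  | nil => rfl
  | cons w ws ih => cases w <;> simp [ih]

-- the shared core: for any word list, A's alias equals B's alias
theorem pv_core (m mx : Int) (ws : List (List Char)) :
    String.ofList (PySem.List.slice
      (if ((ws.flatMap (fun w => match w with | [] => ([] : List Char) | c :: _ => [c])).length : Int) < m then
        ws.foldl (fun a w =>
          (w.drop 1).foldl (fun a c => if (a.length : Int) < m then a ++ [c] else a) a)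
          (ws.flatMap (fun w => match w with | [] => ([] : List Char) | c :: _ => [c]))
      else ws.flatMap (fun w => match w with | [] => ([] : List Char) | c :: _ => [c]))
      none (some mx))
    = String.ofList (PySem.List.slice
      (if 0 < m - ((ws.flatMap (List.take 1)).length : Int) then
        ws.flatMap (List.take 1) ++ PySem.List.slice (ws.flatMap (List.drop 1)) none (some (m - ((ws.flatMap (List.take 1)).length : Int)))
      else ws.flatMap (List.take 1)) none (some mx)) := by
  rw [pv_initials_eq]
  set I := ws.flatMap (List.take 1) with hI
  by_cases h : (I.length : Int) < m
  · rw [if_pos h, if_pos (by omega), pv_word_fold,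
      show PySem.List.slice (ws.flatMap (List.drop 1)) none (some (m - (I.length : Int)))
          = (ws.flatMap (List.drop 1)).take (m - (I.length : Int)).toNat
        from PySem.List.slice_to _ (by omega)]
  · rw [if_neg h, if_neg (by omega)]

-- ===== VERDICT (by name: the statement is the Claim_ definition above) =====
theorem generate_name_alias_spec : Claim_equal_generate_name_alias := by
  intro name min_length max_length forced_length _
  unfold Spec_generate_name_alias generate_name_alias generate_name_alias_alt pvWordsA
  by_cases h1 : PySem.Chars.isIn ['_'] (PySem.Chars.lower name.toList)
  case _ => simp only [h1, if_true]; exact pv_core min_length max_length _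
  case _ =>
    by_cases h2 : PySem.Chars.isIn [' '] (PySem.Chars.lower name.toList)
    · simp only [h1, h2, if_false, if_true, Bool.false_eq_true]
      exact pv_core min_length max_length _
    · simp only [h1, h2, if_false, Bool.false_eq_true]
      exact pv_core min_length max_length _
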